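-- pv_equiv track=rewrite | github.com/rkronberg/slice-and-dice | scripts/methods.py | frame_size
-- ===== SOURCE A (Python) =====
-- def frame_size(inp, regex):
--
-- 	# Calculate the number of lines per frame in input trajectory
-- 	count = None
-- 	for line in inp:
-- 		# Count number of lines between the 1st and 2nd occurence of regex
-- 		if regex in line:
-- 			if count is None:
-- 				count = 1
-- 			else:
-- 				break
-- 		elif count is not None:
-- 			count += 1
--
-- 	return count
-- ===== SOURCE B (Python) =====
-- def frame_size(inp, regex):
--     lines = list(inp)
--     hits = [i for i, line in enumerate(lines) if regex in line]
--     if not hits: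
--         return None
--     if len(hits) >= 2:
--         return hits[1] - hits[0]
--     return len(lines) - hits[0]
-- ===== Notes on version B (the rewrite author's own statement) =====
-- stated objective: simpler
-- what changed: Replaces the stateful single-pass counter (optional count with break/increment cases) by an index table: collect all match indices with one comprehension, then return None / hits[1]-hits[0] / len(lines)-hits[0] by plain arithmetic.
import Mathlib
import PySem

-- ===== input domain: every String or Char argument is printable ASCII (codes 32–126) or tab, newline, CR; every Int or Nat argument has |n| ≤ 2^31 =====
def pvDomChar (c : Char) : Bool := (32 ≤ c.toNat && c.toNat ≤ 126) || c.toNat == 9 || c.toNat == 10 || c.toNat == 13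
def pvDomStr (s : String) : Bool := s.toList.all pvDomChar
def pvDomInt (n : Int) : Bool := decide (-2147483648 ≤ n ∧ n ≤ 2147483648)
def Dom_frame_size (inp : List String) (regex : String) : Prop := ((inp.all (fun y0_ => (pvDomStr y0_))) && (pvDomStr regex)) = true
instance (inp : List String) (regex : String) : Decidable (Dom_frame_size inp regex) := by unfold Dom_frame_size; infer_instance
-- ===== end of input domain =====

-- B replaces A's stateful counter (optional count, break on second hit) by a one-pass index
-- table of all match positions plus closed-form arithmetic on its first two entries (simpler).

-- ===== PORT A =====
-- the for-loop of A: state 'count : Option Int', 'break' returns the current count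
def frameSizeLoopA (regex : String) : List String → Option Int → Option Int
  | [], count => count
  | line :: rest, count =>
    if PySem.Str.isIn regex line then
      match count with
      | none => frameSizeLoopA regex rest (some 1)
      | some _ => count            -- break
    else
      match count with
      | none => frameSizeLoopA regex rest none
      | some k => frameSizeLoopA regex rest (some (k + 1))

def frame_size (inp : List String) (regex : String) : Option Int :=
  frameSizeLoopA regex inp none

-- ===== PORT B =====
def frame_size_alt (inp : List String) (regex : String) : Option Int :=
  let lines := inp
  let hits := ((PySem.List.enumerate lines 0).filter (fun p => PySem.Str.isIn regex p.2)).map (·.1)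
  match hits with
  | [] => none
  | [i] => some ((lines.length : Int) - i)
  | i :: j :: _ => some (j - i)

-- ===== PRECONDITION & SPEC =====
def Spec_frame_size (inp : List String) (regex : String) (out : Option Int) : Prop := out = frame_size_alt inp regex
instance (inp : List String) (regex : String) (out : Option Int) : Decidable (Spec_frame_size inp regex out) := by unfold Spec_frame_size; infer_instance

-- ===== CLAIM (what is proved, stated in full; the proofs are below) =====
def Claim_equal_frame_size : Prop := ∀ (inp : List String) (regex : String), Dom_frame_size inp regex → Spec_frame_size inp regex (frame_size inp regex)

-- ===== LEMMAS AND PROOFS =====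

-- the match-index list of B, with a generalized enumeration start s
def hitsFrom (regex : String) (s : Int) (ls : List String) : List Int :=
  ((PySem.List.enumerate ls s).filter (fun p => PySem.Str.isIn regex p.2)).map (·.1)

theorem hitsFrom_nil (regex : String) (s : Int) : hitsFrom regex s [] = [] := rfl

theorem hitsFrom_cons (regex : String) (s : Int) (l : String) (ls : List String) :
    hitsFrom regex s (l :: ls) =
      if PySem.Str.isIn regex l then s :: hitsFrom regex (s + 1) ls
      else hitsFrom regex (s + 1) ls := by
  simp only [hitsFrom, PySem.List.enumerate_cons, List.filter_cons]
  split_ifs with h <;> simp_all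

-- A's loop in the 'counting' phase: adds the offset to the next hit (or to the end)
theorem loopA_some (regex : String) (ls : List String) : ∀ (s k : Int),
    frameSizeLoopA regex ls (some k) =
      some (k + (match hitsFrom regex s ls with
                 | [] => (ls.length : Int)
                 | i :: _ => i - s)) := by
  induction ls with
  | nil => intro s k; simp [frameSizeLoopA, hitsFrom_nil]
  | cons l ls ih =>
    intro s k
    rw [hitsFrom_cons]
    by_cases h : PySem.Str.isIn regex l = true
    · rw [if_pos h]
      simp only [frameSizeLoopA]
      rw [if_pos h]
      norm_num
    · rw [if_neg h]
      simp only [frameSizeLoopA]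
      rw [if_neg h, ih (s + 1) (k + 1)]
      cases hh : hitsFrom regex (s + 1) ls with
      | nil => simp; ring
      | cons i t => simp; ring

-- A's loop in the 'searching' phase equals B's case analysis on the hit list
theorem loopA_none (regex : String) (ls : List String) : ∀ (s : Int),
    frameSizeLoopA regex ls none =
      (match hitsFrom regex s ls with
       | [] => none
       | [i] => some (s + (ls.length : Int) - i)
       | i :: j :: _ => some (j - i)) := by
  induction ls with
  | nil => intro s; simp [frameSizeLoopA, hitsFrom_nil]
  | cons l ls ih =>
    intro s
    rw [hitsFrom_cons]
    by_cases h : PySem.Str.isIn regex l = true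
    · rw [if_pos h]
      simp only [frameSizeLoopA]
      rw [if_pos h, loopA_some regex ls (s + 1) 1]
      cases hitsFrom regex (s + 1) ls with
      | nil => simp; omega
      | cons i t => simp; ring
    · rw [if_neg h]
      simp only [frameSizeLoopA]
      rw [if_neg h, ih (s + 1)]
      cases hitsFrom regex (s + 1) ls with
      | nil => simp
      | cons i t =>
        cases t with
        | nil => simp; omega
        | cons j u => simp

-- ===== VERDICT (by name: the statement is the Claim_ definition above) =====
theorem frame_size_spec : Claim_equal_frame_size := by
  intro inp regex _
  unfold Spec_frame_size frame_size frame_size_alt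
  rw [loopA_none regex inp 0]
  show _ = (match hitsFrom regex 0 inp with
            | [] => none
            | [i] => some ((inp.length : Int) - i)
            | i :: j :: _ => some (j - i))
  cases hh : hitsFrom regex 0 inp with
  | nil => simp
  | cons i t =>
    cases t with
    | nil => simp
    | cons j u => simp
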